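-- pv_equiv track=rewrite | github.com/Cenzito/Brainfuck-Optimizer | bf.py | bsplit
-- ===== SOURCE A (Python) =====
-- def bsplit(string):
--     ''' splits a string between loop and non loop sections'''
--     sp=[]
--     section=''
--     for i in range(len(string)):
--         if string[i] in'[].,|=':
--             sp.append(section)
--             sp.append(string[i])
--             section=''
--
--         else:
--             section= str(section) +str(string[i])
--
--     sp.append(section)
--     return sp
-- ===== SOURCE B (Python) =====
-- def bsplit(string):
--     '''splits a string between loop and non loop sections'''
--     parts = []
--     start = 0
--     for i, c in enumerate(string):
--         if c in '[].,|=':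
--             parts.append(string[start:i])
--             parts.append(c)
--             start = i + 1
--     parts.append(string[start:])
--     return parts
-- ===== Notes on version B (the rewrite author's own statement) =====
-- stated objective: faster
-- what changed: B keeps no growing section accumulator: it records the start index of the current section and emits each section as a slice string[start:i] at every delimiter (plus the final tail slice), instead of A's character-by-character string concatenation with a flush.
import Mathlib
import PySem

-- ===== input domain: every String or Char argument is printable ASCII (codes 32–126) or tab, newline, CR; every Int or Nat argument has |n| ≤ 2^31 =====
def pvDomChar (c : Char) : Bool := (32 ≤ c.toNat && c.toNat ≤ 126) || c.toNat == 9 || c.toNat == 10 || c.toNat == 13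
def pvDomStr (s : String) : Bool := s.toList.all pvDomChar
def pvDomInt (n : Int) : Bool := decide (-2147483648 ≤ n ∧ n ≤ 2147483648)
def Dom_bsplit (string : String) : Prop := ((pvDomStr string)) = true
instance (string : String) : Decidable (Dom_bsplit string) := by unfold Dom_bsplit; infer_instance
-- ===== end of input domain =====

-- B tracks only the start index of the current section and emits sections as slices
-- at each delimiter; same return value as A everywhere (alternative decomposition).

def pvDelims : List Char := ['[', ']', '.', ',', '|', '=']

-- ===== PORT A =====
-- A's loop: state (sp, section); on a delimiter flush section and the delimiter, else extend section.
def bsplitStepA (st : List (List Char) × List Char) (c : Char) : List (List Char) × List Char :=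
  if c ∈ pvDelims then (st.1 ++ [st.2, [c]], []) else (st.1, st.2 ++ [c])

def bsplit (string : String) : List String :=
  let st := string.toList.foldl bsplitStepA ([], [])
  (st.1 ++ [st.2]).map String.mk

-- ===== PORT B =====
-- B's loop body over enumerate(string): state (parts, start); on a delimiter append
-- string[start:i] and the delimiter and set start = i + 1, else leave the state alone.
def bsplitStepB (full : List Char) (st : List (List Char) × Int) (ic : Int × Char) :
    List (List Char) × Int :=
  if ic.2 ∈ pvDelims then
    (st.1 ++ [PySem.List.slice full (some st.2) (some ic.1), [ic.2]], ic.1 + 1)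
  else st

def bsplit_alt (string : String) : List String :=
  let full := string.toList
  let st := (PySem.List.enumerate full 0).foldl (bsplitStepB full) ([], 0)
  (st.1 ++ [PySem.List.slice full (some st.2) none]).map String.mk

-- ===== PRECONDITION & SPEC =====
def Spec_bsplit (string : String) (out : List String) : Prop := out = bsplit_alt string
instance (string : String) (out : List String) : Decidable (Spec_bsplit string out) := by unfold Spec_bsplit; infer_instance

-- ===== CLAIM (what is proved, stated in full; the proofs are below) =====
def Claim_equal_bsplit : Prop := ∀ (string : String), Dom_bsplit string → Spec_bsplit string (bsplit string)

-- ===== LEMMAS AND PROOFS =====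

-- canonical split on char lists, used as the meeting point of both ports
def updHead (c : Char) : List (List Char) → List (List Char)
  | [] => []
  | s :: ss => (c :: s) :: ss

def splitCore : List Char → List (List Char)
  | [] => [[]]
  | c :: cs => if c ∈ pvDelims then [] :: [c] :: splitCore cs else updHead c (splitCore cs)

def prepHead (p : List Char) : List (List Char) → List (List Char)
  | [] => []
  | s :: ss => (p ++ s) :: ss

theorem prepHead_nil (S : List (List Char)) : prepHead [] S = S := by
  cases S <;> simp [prepHead]

theorem prepHead_updHead (p : List Char) (c : Char) (S : List (List Char)) :
    prepHead p (updHead c S) = prepHead (p ++ [c]) S := by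
  cases S <;> simp [prepHead, updHead]

theorem foldA_eq (cs : List Char) : ∀ (sp : List (List Char)) (sec : List Char),
    (cs.foldl bsplitStepA (sp, sec)).1 ++ [(cs.foldl bsplitStepA (sp, sec)).2]
      = sp ++ prepHead sec (splitCore cs) := by
  induction cs with
  | nil => intro sp sec; simp [splitCore, prepHead]
  | cons c cs ih =>
    intro sp sec
    by_cases h : c ∈ pvDelims
    · simp [bsplitStepA, h, splitCore, ih, prepHead]
      cases splitCore cs <;> rfl
    · simp [bsplitStepA, h, splitCore, ih, prepHead_updHead]

theorem slice_self (full : List Char) (a : Nat) :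
    PySem.List.slice full (some (a : Int)) (some (a : Int)) = [] := by
  simp [PySem.List.slice_natCast]

theorem slice_extend (pre : List Char) (c : Char) (cs : List Char) (s : Nat) (hs : s ≤ pre.length) :
    PySem.List.slice (pre ++ c :: cs) (some (s : Int)) (some ((pre.length : Int) + 1))
      = PySem.List.slice (pre ++ c :: cs) (some (s : Int)) (some (pre.length : Int)) ++ [c] := by
  have h1 : ((pre.length : Int) + 1) = ((pre.length + 1 : Nat) : Int) := by push_cast; ring
  rw [h1, PySem.List.slice_natCast, PySem.List.slice_natCast]
  have hd : (pre ++ c :: cs).drop s = pre.drop s ++ c :: cs := by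
    rw [List.drop_append_of_le_length hs]
  have hlen : (pre.drop s).length = pre.length - s := by simp
  rw [hd]
  have h2 : pre.length + 1 - s = (pre.length - s) + 1 := by omega
  have h3 : (pre.drop s ++ c :: cs).take (pre.length - s) = pre.drop s := by
    rw [← hlen, List.take_left]
  have h4 : (pre.drop s ++ c :: cs).take ((pre.length - s) + 1) = pre.drop s ++ [c] := by
    rw [← hlen, List.take_append]
    simp
  rw [h2, h3, h4]

theorem foldB_inv (full : List Char) (cs : List Char) : ∀ (pre : List Char),
    full = pre ++ cs → ∀ (parts : List (List Char)) (s : Nat), s ≤ pre.length →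
    (let r := (PySem.List.enumerate cs (pre.length : Int)).foldl (bsplitStepB full)
        (parts, (s : Int))
     r.1 ++ [PySem.List.slice full (some r.2) none])
      = parts ++ prepHead
          (PySem.List.slice full (some (s : Int)) (some (pre.length : Int))) (splitCore cs) := by
  induction cs with
  | nil =>
    intro pre hfull parts s hs
    subst hfull
    simp only [PySem.List.enumerate_nil, List.foldl_nil, splitCore, prepHead,
      PySem.List.slice_from_natCast, PySem.List.slice_natCast, List.append_nil,
      List.append_cancel_left_eq, List.cons.injEq, and_true]
    rw [List.take_of_length_le (by simp)]
  | cons c cs ih =>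
    intro pre hfull parts s hs
    rw [PySem.List.enumerate_cons, List.foldl_cons]
    by_cases h : c ∈ pvDelims
    · have hstep : bsplitStepB full (parts, (s : Int)) ((pre.length : Int), c)
          = (parts ++ [PySem.List.slice full (some (s : Int)) (some (pre.length : Int)), [c]],
             (pre.length : Int) + 1) := by
        simp [bsplitStepB, h]
      rw [hstep]
      have h1 : ((pre.length : Int) + 1) = (((pre ++ [c]).length : Nat) : Int) := by
        push_cast; simp
      rw [h1]
      have := ih (pre ++ [c]) (by simpa using hfull) 
        (parts ++ [PySem.List.slice full (some (s : Int)) (some (pre.length : Int)), [c]])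
        (pre ++ [c]).length (le_refl _)
      rw [this, slice_self, prepHead_nil]
      simp [splitCore, h, prepHead]
    · have hstep : bsplitStepB full (parts, (s : Int)) ((pre.length : Int), c)
          = (parts, (s : Int)) := by simp [bsplitStepB, h]
      rw [hstep]
      have h1 : ((pre.length : Int) + 1) = (((pre ++ [c]).length : Nat) : Int) := by
        push_cast; simp
      rw [h1]
      have := ih (pre ++ [c]) (by simpa using hfull) parts s (by simp; omega)
      rw [this]
      have h2 : (((pre ++ [c]).length : Nat) : Int) = (pre.length : Int) + 1 := by
        push_cast; simp
      rw [h2, hfull, slice_extend pre c cs s hs, splitCore]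
      simp [h, prepHead_updHead]

-- ===== VERDICT (by name: the statement is the Claim_ definition above) =====
theorem bsplit_spec : Claim_equal_bsplit := by
  intro string _
  show bsplit string = bsplit_alt string
  unfold bsplit bsplit_alt
  have hA := foldA_eq string.toList [] []
  simp only [List.nil_append] at hA
  have hB := foldB_inv string.toList string.toList [] rfl [] 0 (by simp)
  simp only [List.length_nil, Nat.cast_zero, List.nil_append] at hB
  show List.map String.mk _ = List.map String.mk _
  have h0 : PySem.List.slice string.toList (some (0 : Int)) (some (0 : Int)) = [] := by
    simpa using slice_self string.toList 0
  rw [hA, prepHead_nil, hB, h0, prepHead_nil]
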